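-- pv_equiv track=rewrite | github.com/fwyc0573/Megatron-LM | test_moe_rank_mapping.py | generate_masked_orthogonal_rank_groups
-- ===== SOURCE A (Python) =====
-- def inner_product(a, b):
--     return sum(x * y for x, y in zip(a, b))
--
-- def decompose(index, shape):
--     """将一维索引分解为多维索引"""
--     result = []
--     for s in reversed(shape):
--         result.append(index % s)
--         index //= s
--     return list(reversed(result))
--
-- def generate_masked_orthogonal_rank_groups(world_size, parallel_size, mask):
--     """生成正交的 rank 组"""
--     masked_shape = [s for s, m in zip(parallel_size, mask) if m]
--     unmasked_shape = [s for s, m in zip(parallel_size, mask) if not m]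
--
--     if not masked_shape:
--         return [[i for i in range(world_size)]]
--     if not unmasked_shape:
--         return [[i] for i in range(world_size)]
--
--     def get_stride(shape):
--         stride = [1]
--         for s in reversed(shape[1:]):
--             stride.append(stride[-1] * s)
--         return list(reversed(stride))
--
--     masked_stride = get_stride(masked_shape)
--     unmasked_stride = get_stride(unmasked_shape)
--
--     group_size = inner_product(masked_shape, [1] * len(masked_shape))
--     num_of_group = world_size // group_size
--
--     ranks = []
--     for group_index in range(num_of_group):
--         decomposed_group_idx = decompose(group_index, unmasked_shape)
--         rank = []
--         for rank_in_group in range(group_size):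
--             decomposed_rank_idx = decompose(rank_in_group, masked_shape)
--             rank.append(
--                 inner_product(decomposed_rank_idx, masked_stride)
--                 + inner_product(decomposed_group_idx, unmasked_stride)
--             )
--         ranks.append(rank)
--     return ranks
-- ===== SOURCE B (Python) =====
-- def _offsets(n, shape):
--     """First n offsets of the counter 0,1,2,... in the mixed-radix system `shape`
--     (least-significant digit = last entry, Python floored divmod), generated
--     incrementally by an odometer: registers hold the floor-division chain of the
--     current counter value, and each tick refreshes registers only until one of
--     them is unchanged, adjusting the running offset by the digits that changed."""
--     rev = shape[::-1]
--     strides = []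
--     st = 1
--     for s in rev:
--         strides.append(st)
--         st *= s
--     out = []
--     regs = [0] * len(rev)
--     off = 0
--     for _ in range(n):
--         out.append(off)
--         new = regs[0] + 1
--         k = 0
--         while k < len(rev):
--             if k > 0 and new == regs[k]:
--                 break
--             off += ((new % rev[k]) - (regs[k] % rev[k])) * strides[k]
--             regs[k] = new
--             new = new // rev[k]
--             k += 1
--     return out
--
--
-- def generate_masked_orthogonal_rank_groups(world_size, parallel_size, mask):
--     masked_shape = [s for s, m in zip(parallel_size, mask) if m]
--     unmasked_shape = [s for s, m in zip(parallel_size, mask) if not m]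
--
--     if not masked_shape:
--         return [list(range(world_size))]
--     if not unmasked_shape:
--         return [[i] for i in range(world_size)]
--
--     group_size = sum(masked_shape)
--     group_offsets = _offsets(world_size // group_size, unmasked_shape)
--     if not group_offsets:
--         return []
--     rank_offsets = _offsets(group_size, masked_shape)
--     return [[g + r for r in rank_offsets] for g in group_offsets]
-- ===== Notes on version B (the rewrite author's own statement) =====
-- stated objective: alternative
-- what changed: B replaces A's per-element index decomposition inside the nested group-by-rank loop with an incremental odometer: each offset sequence is generated once by a stateful counter whose registers hold the floor-division chain of the current index and whose ticks update only the digits that change, and every rank is then formed by one scalar addition.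
import Mathlib
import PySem

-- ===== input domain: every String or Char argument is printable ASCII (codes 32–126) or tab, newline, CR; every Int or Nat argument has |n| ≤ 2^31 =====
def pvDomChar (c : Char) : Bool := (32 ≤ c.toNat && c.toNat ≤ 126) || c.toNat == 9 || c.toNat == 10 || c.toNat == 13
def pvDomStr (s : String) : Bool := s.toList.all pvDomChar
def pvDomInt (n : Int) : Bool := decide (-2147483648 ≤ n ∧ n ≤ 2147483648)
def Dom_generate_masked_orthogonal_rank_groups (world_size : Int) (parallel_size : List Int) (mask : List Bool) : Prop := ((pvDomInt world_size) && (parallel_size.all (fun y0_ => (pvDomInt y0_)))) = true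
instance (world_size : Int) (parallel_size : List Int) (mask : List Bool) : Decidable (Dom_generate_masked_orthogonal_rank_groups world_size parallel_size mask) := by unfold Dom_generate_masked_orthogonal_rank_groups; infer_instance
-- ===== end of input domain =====

-- B generates each offset sequence once with an incremental odometer counter (instead of A's
-- per-element re-decomposition inside the nested loop) and forms every rank by one scalar addition.
-- ===== PORT A =====
def pvInnerProduct (a b : List Int) : Int :=
  (a.zip b).foldl (fun acc p => acc + p.1 * p.2) 0

def pvDecompose (index : Int) (shape : List Int) : List Int :=
  (shape.reverse.foldl
    (fun (st : List Int × Int) s =>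
      (st.1 ++ [PySem.Int.mod st.2 s], PySem.Int.floordiv st.2 s))
    ([], index)).1.reverse

def pvGetStride (shape : List Int) : List Int :=
  ((shape.drop 1).reverse.foldl
    (fun (st : List Int) s => st ++ [st.getLast! * s]) [1]).reverse

def generate_masked_orthogonal_rank_groups (world_size : Int) (parallel_size : List Int) (mask : List Bool) : List (List Int) :=
  let masked_shape := ((parallel_size.zip mask).filter (fun p => p.2)).map Prod.fst
  let unmasked_shape := ((parallel_size.zip mask).filter (fun p => !p.2)).map Prod.fst
  if masked_shape = [] then [PySem.List.pyRange 0 world_size 1]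
  else if unmasked_shape = [] then (PySem.List.pyRange 0 world_size 1).map (fun i => [i])
  else
    let masked_stride := pvGetStride masked_shape
    let unmasked_stride := pvGetStride unmasked_shape
    let group_size := pvInnerProduct masked_shape (List.replicate masked_shape.length 1)
    let num_of_group := PySem.Int.floordiv world_size group_size
    (PySem.List.pyRange 0 num_of_group 1).foldl
      (fun ranks group_index =>
        let decomposed_group_idx := pvDecompose group_index unmasked_shape
        let rank := (PySem.List.pyRange 0 group_size 1).foldl
          (fun rank rank_in_group =>
            rank ++ [pvInnerProduct (pvDecompose rank_in_group masked_shape) masked_stride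
                     + pvInnerProduct decomposed_group_idx unmasked_stride]) []
        ranks ++ [rank]) []

-- ===== PORT B =====
-- odometer levels: one (radix, stride, register) triple per digit, least-significant first
-- (Source B keeps the three in the parallel lists rev/strides/regs indexed by k; the port zips them)
def pvInitLevels : Int → List Int → List (Int × Int × Int)
  | _, [] => []
  | st, s :: rs => (s, st, 0) :: pvInitLevels (st * s) rs

-- Source B's inner while-loop: refresh registers from `new` downwards, stopping (k > 0) at an
-- unchanged register; returns the updated levels and the offset delta accumulated into `off`
def pvBump : List (Int × Int × Int) → Int → Bool → List (Int × Int × Int) × Int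
  | [], _, _ => ([], 0)
  | (s, st, r) :: rest, new, first =>
    if !first && new == r then ((s, st, r) :: rest, 0)
    else
      let d := (PySem.Int.mod new s - PySem.Int.mod r s) * st
      let p := pvBump rest (PySem.Int.floordiv new s) false
      ((s, st, new) :: p.1, d + p.2)

def pvOffsets (n : Int) (shape : List Int) : List Int :=
  ((PySem.List.pyRange 0 n 1).foldl
    (fun (st : List Int × List (Int × Int × Int) × Int) _ =>
      let new := (match st.2.1 with | (_, _, r) :: _ => r + 1 | [] => 0)
      let p := pvBump st.2.1 new true
      (st.1 ++ [st.2.2], p.1, st.2.2 + p.2))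
    ([], pvInitLevels 1 shape.reverse, 0)).1

def generate_masked_orthogonal_rank_groups_alt (world_size : Int) (parallel_size : List Int) (mask : List Bool) : List (List Int) :=
  let masked_shape := ((parallel_size.zip mask).filter (fun p => p.2)).map Prod.fst
  let unmasked_shape := ((parallel_size.zip mask).filter (fun p => !p.2)).map Prod.fst
  if masked_shape = [] then [PySem.List.pyRange 0 world_size 1]
  else if unmasked_shape = [] then (PySem.List.pyRange 0 world_size 1).map (fun i => [i])
  else
    let group_size := masked_shape.sum
    let group_offsets := pvOffsets (PySem.Int.floordiv world_size group_size) unmasked_shape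
    if group_offsets = [] then []
    else
      let rank_offsets := pvOffsets group_size masked_shape
      group_offsets.map (fun g => rank_offsets.map (fun r => g + r))

-- ===== PRECONDITION & SPEC =====
-- Pre_ excludes exactly the inputs where the Python A raises ZeroDivisionError: a zero
-- masked-shape sum, or a zero entry in a shape whose decomposition is actually reached
-- (group count positive; masked shape only reached when the group size is also positive).
def Pre_generate_masked_orthogonal_rank_groups (world_size : Int) (parallel_size : List Int) (mask : List Bool) : Prop :=
  let masked_shape := ((parallel_size.zip mask).filter (fun p => p.2)).map Prod.fst
  let unmasked_shape := ((parallel_size.zip mask).filter (fun p => !p.2)).map Prod.fst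
  masked_shape ≠ [] → unmasked_shape ≠ [] →
    (masked_shape.sum ≠ 0 ∧
     (0 < PySem.Int.floordiv world_size masked_shape.sum →
        (0:Int) ∉ unmasked_shape ∧ (0 < masked_shape.sum → (0:Int) ∉ masked_shape)))
instance (world_size : Int) (parallel_size : List Int) (mask : List Bool) : Decidable (Pre_generate_masked_orthogonal_rank_groups world_size parallel_size mask) := by unfold Pre_generate_masked_orthogonal_rank_groups; infer_instance

def pvWitness_generate_masked_orthogonal_rank_groups : Int × List Int × List Bool := (6, [2, 3], [true, false])

def Spec_generate_masked_orthogonal_rank_groups (world_size : Int) (parallel_size : List Int) (mask : List Bool) (out : List (List Int)) : Prop := out = generate_masked_orthogonal_rank_groups_alt world_size parallel_size mask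
instance (world_size : Int) (parallel_size : List Int) (mask : List Bool) (out : List (List Int)) : Decidable (Spec_generate_masked_orthogonal_rank_groups world_size parallel_size mask out) := by unfold Spec_generate_masked_orthogonal_rank_groups; infer_instance

-- ===== CLAIM (what is proved, stated in full; the proofs are below) =====
def Claim_equal_generate_masked_orthogonal_rank_groups : Prop := ∀ (world_size : Int) (parallel_size : List Int) (mask : List Bool), Dom_generate_masked_orthogonal_rank_groups world_size parallel_size mask → Pre_generate_masked_orthogonal_rank_groups world_size parallel_size mask → Spec_generate_masked_orthogonal_rank_groups world_size parallel_size mask (generate_masked_orthogonal_rank_groups world_size parallel_size mask)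

-- ===== LEMMAS AND PROOFS =====

-- mixed-radix value of `idx` over the REVERSED shape list `rs` (least-significant first)
def pvS : List Int → Int → Int
  | [], _ => 0
  | s :: rs, idx => PySem.Int.mod idx s + s * pvS rs (PySem.Int.floordiv idx s)

-- the digit list produced while processing `rs` (least-significant first)
def pvDigits : List Int → Int → List Int
  | [], _ => []
  | s :: rs, idx => PySem.Int.mod idx s :: pvDigits rs (PySem.Int.floordiv idx s)

-- running prefix products starting at l
def pvScan : Int → List Int → List Int
  | l, [] => [l]
  | l, s :: rs => l :: pvScan (l * s) rs

-- odometer specification: levels state and stride-weighted offset at counter value idx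
def pvChain : Int → List Int → Int → List (Int × Int × Int)
  | _, [], _ => []
  | st, s :: rs, idx => (s, st, idx) :: pvChain (st * s) rs (PySem.Int.floordiv idx s)

def pvVal : Int → List Int → Int → Int
  | _, [], _ => 0
  | st, s :: rs, idx => st * PySem.Int.mod idx s + pvVal (st * s) rs (PySem.Int.floordiv idx s)

theorem pvDigits_length (rs : List Int) (idx : Int) : (pvDigits rs idx).length = rs.length := by
  induction rs generalizing idx with
  | nil => rfl
  | cons s rs ih => simp [pvDigits, ih]

theorem pvScan_length (l : Int) (rs : List Int) : (pvScan l rs).length = rs.length + 1 := by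
  induction rs generalizing l with
  | nil => rfl
  | cons s rs ih => simp [pvScan, ih]

theorem pvDecompose_fold (rs : List Int) (acc : List Int) (idx : Int) :
    (rs.foldl
      (fun (st : List Int × Int) s =>
        (st.1 ++ [PySem.Int.mod st.2 s], PySem.Int.floordiv st.2 s)) (acc, idx)).1
    = acc ++ pvDigits rs idx := by
  induction rs generalizing acc idx with
  | nil => simp [pvDigits]
  | cons s rs ih => simp [List.foldl_cons, ih, pvDigits]

theorem pvDecompose_eq (idx : Int) (shape : List Int) :
    pvDecompose idx shape = (pvDigits shape.reverse idx).reverse := by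
  unfold pvDecompose; rw [pvDecompose_fold]; simp

theorem pvStride_fold (rs : List Int) (acc : List Int) (l : Int) :
    rs.foldl (fun (st : List Int) s => st ++ [st.getLast! * s]) (acc ++ [l])
    = acc ++ pvScan l rs := by
  induction rs generalizing acc l with
  | nil => simp [pvScan]
  | cons s rs ih =>
    have hlast : (acc ++ [l]).getLast! = l := by simp
    simp only [List.foldl_cons, hlast]
    rw [ih (acc ++ [l]) (l * s)]
    simp [pvScan]

theorem pvGetStride_eq (shape : List Int) :
    pvGetStride shape = (pvScan 1 (shape.drop 1).reverse).reverse := by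
  have h := pvStride_fold (shape.drop 1).reverse [] 1
  simp only [List.nil_append] at h
  unfold pvGetStride; rw [h]

theorem pvFoldl_shift (l : List (Int × Int)) (a : Int) :
    l.foldl (fun acc p => acc + p.1 * p.2) a = a + l.foldl (fun acc p => acc + p.1 * p.2) 0 := by
  induction l generalizing a with
  | nil => simp
  | cons p l ih => simp only [List.foldl_cons]; rw [ih (a + p.1 * p.2), ih (0 + p.1 * p.2)]; ring

theorem pvIP_cons (x y : Int) (a b : List Int) :
    pvInnerProduct (x :: a) (y :: b) = x * y + pvInnerProduct a b := by
  unfold pvInnerProduct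
  simp only [List.zip_cons_cons, List.foldl_cons]
  rw [pvFoldl_shift]; ring

theorem pvZip_rev (a b : List Int) (h : a.length = b.length) :
    a.reverse.zip b.reverse = (a.zip b).reverse := by
  induction a generalizing b with
  | nil =>
    cases b with
    | nil => simp
    | cons y b => simp at h
  | cons x a ih =>
    cases b with
    | nil => simp at h
    | cons y b =>
      have hl : a.length = b.length := by simpa using h
      simp only [List.reverse_cons]
      rw [List.zip_append (by simp [hl]), ih b hl]
      simp

theorem pvIP_eq_sum (a b : List Int) :
    pvInnerProduct a b = ((a.zip b).map (fun p => p.1 * p.2)).sum := by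
  unfold pvInnerProduct
  generalize a.zip b = l
  induction l with
  | nil => rfl
  | cons x l ih =>
    simp only [List.foldl_cons, List.map_cons, List.sum_cons]
    rw [pvFoldl_shift, ih]; ring

theorem pvIP_rev (a b : List Int) (h : a.length = b.length) :
    pvInnerProduct a.reverse b.reverse = pvInnerProduct a b := by
  rw [pvIP_eq_sum, pvIP_eq_sum, pvZip_rev a b h, List.map_reverse, List.sum_reverse]

theorem pvIP_digits_scan (rs : List Int) (x idx l : Int) :
    pvInnerProduct (pvDigits (rs ++ [x]) idx) (pvScan l rs) = l * pvS (rs ++ [x]) idx := by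
  induction rs generalizing idx l with
  | nil => simp [pvDigits, pvScan, pvS, pvInnerProduct]; ring
  | cons s rs ih =>
    simp only [List.cons_append, pvDigits, pvScan, pvS]
    rw [pvIP_cons, ih]; ring

theorem pvA_term_eq (idx : Int) (shape : List Int) (h : shape ≠ []) :
    pvInnerProduct (pvDecompose idx shape) (pvGetStride shape) = pvS shape.reverse idx := by
  obtain ⟨s0, t, rfl⟩ := List.exists_cons_of_ne_nil h
  rw [pvDecompose_eq, pvGetStride_eq]
  simp only [List.drop_succ_cons, List.drop_zero, List.reverse_cons]
  rw [pvIP_rev _ _ (by simp [pvDigits_length, pvScan_length]), pvIP_digits_scan]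
  ring

theorem pvIP_replicate_one (a : List Int) :
    pvInnerProduct a (List.replicate a.length 1) = a.sum := by
  induction a with
  | nil => rfl
  | cons x a ih =>
    simp only [List.length_cons, List.replicate_succ]
    rw [pvIP_cons, ih, List.sum_cons, mul_one]

theorem pvFoldl_append_map {α β : Type} (l : List α) (f : α → β) (init : List β) :
    l.foldl (fun acc x => acc ++ [f x]) init = init ++ l.map f := by
  induction l generalizing init with
  | nil => simp
  | cons x l ih => simp [ih]

-- B-side: the odometer lemmas
theorem pvInit_eq_chain (st : Int) (rs : List Int) : pvInitLevels st rs = pvChain st rs 0 := by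
  induction rs generalizing st with
  | nil => rfl
  | cons s rs ih =>
    have h0 : PySem.Int.floordiv 0 s = 0 := by
      simp [PySem.Int.floordiv]
    simp [pvInitLevels, pvChain, h0, ih]

theorem pvBump_spec (rs : List Int) (st a b : Int) (first : Bool) :
    pvBump (pvChain st rs a) b first = (pvChain st rs b, pvVal st rs b - pvVal st rs a) := by
  induction rs generalizing st a b first with
  | nil => simp [pvChain, pvBump, pvVal]
  | cons s rs ih =>
    simp only [pvChain, pvBump, pvVal]
    by_cases hba : b = a
    · subst hba
      cases first with
      | false => simp
      | true => simp [ih]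
    · have hne : (b == a) = false := by simp [hba]
      rw [if_neg (by simp [hne])]
      simp only [ih, Prod.mk.injEq]
      exact ⟨trivial, by ring⟩

theorem pvVal_eq_pvS (rs : List Int) (st idx : Int) : pvVal st rs idx = st * pvS rs idx := by
  induction rs generalizing st idx with
  | nil => simp [pvVal, pvS]
  | cons s rs ih => simp only [pvVal, pvS, ih]; ring

theorem pvVal_zero (st : Int) (rs : List Int) : pvVal st rs 0 = 0 := by
  induction rs generalizing st with
  | nil => rfl
  | cons s rs ih =>
    have hm : PySem.Int.mod 0 s = 0 := by simp [PySem.Int.mod]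
    have hd : PySem.Int.floordiv 0 s = 0 := by simp [PySem.Int.floordiv]
    simp [pvVal, hm, hd, ih]

theorem pvOffsets_nil_loop (l : List Int) (out : List Int) :
    (l.foldl
      (fun (acc : List Int × List (Int × Int × Int) × Int) _ =>
        let new := (match acc.2.1 with | (_, _, r) :: _ => r + 1 | [] => 0)
        let p := pvBump acc.2.1 new true
        (acc.1 ++ [acc.2.2], p.1, acc.2.2 + p.2))
      (out, ([] : List (Int × Int × Int)), (0 : Int)))
    = (out ++ List.replicate l.length 0, [], 0) := by
  induction l generalizing out with
  | nil => simp
  | cons x l ih =>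
    simp only [List.foldl_cons, pvBump, add_zero]
    rw [ih (out ++ [0])]
    simp [List.replicate_succ]

theorem pvOffsets_loop (l : List Int) (s : Int) (rs : List Int) (st : Int) (out : List Int) (idx : Int) :
    (l.foldl
      (fun (acc : List Int × List (Int × Int × Int) × Int) _ =>
        let new := (match acc.2.1 with | (_, _, r) :: _ => r + 1 | [] => 0)
        let p := pvBump acc.2.1 new true
        (acc.1 ++ [acc.2.2], p.1, acc.2.2 + p.2))
      (out, pvChain st (s :: rs) idx, pvVal st (s :: rs) idx))
    = (out ++ (List.range l.length).map (fun k : Nat => pvVal st (s :: rs) (idx + (k : Int))),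
       pvChain st (s :: rs) (idx + (l.length : Int)), pvVal st (s :: rs) (idx + (l.length : Int))) := by
  induction l generalizing out idx with
  | nil => simp
  | cons x l ih =>
    simp only [List.foldl_cons, List.length_cons]
    have hnew : (match pvChain st (s :: rs) idx with | (_, _, r) :: _ => r + 1 | [] => 0) = idx + 1 := by
      simp [pvChain]
    rw [hnew, pvBump_spec (s :: rs) st idx (idx + 1) true]
    have harith : pvVal st (s :: rs) idx + (pvVal st (s :: rs) (idx + 1) - pvVal st (s :: rs) idx)
        = pvVal st (s :: rs) (idx + 1) := by ring
    simp only [harith]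
    rw [ih (out ++ [pvVal st (s :: rs) idx]) (idx + 1)]
    simp only [Prod.mk.injEq]
    refine ⟨?_, ?_, ?_⟩
    · rw [List.append_assoc]
      congr 1
      rw [List.range_succ_eq_map]
      simp only [List.map_cons, List.map_map, Nat.cast_zero, add_zero, List.singleton_append]
      congr 1
      apply List.map_congr_left
      intro k _
      simp only [Function.comp_apply]
      congr 1
      push_cast
      ring
    · congr 1; push_cast; ring
    · congr 1; push_cast; ring

theorem pvOffsets_eq (n : Int) (shape : List Int) :
    pvOffsets n shape = (List.range n.toNat).map (fun k : Nat => pvS shape.reverse (k : Int)) := by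
  unfold pvOffsets
  rw [pvInit_eq_chain]
  cases hrev : shape.reverse with
  | nil =>
    simp only [pvChain]
    rw [pvOffsets_nil_loop]
    simp [pvS, PySem.List.length_pyRange_one]
  | cons s rs =>
    have hmain := pvOffsets_loop (PySem.List.pyRange 0 n 1) s rs 1 [] 0
    rw [pvVal_zero] at hmain
    rw [hmain]
    simp only [List.nil_append, PySem.List.length_pyRange_one, Int.sub_zero, zero_add]
    apply List.map_congr_left
    intro k _
    rw [pvVal_eq_pvS]; ring

-- ===== VERDICT (by name: the statement is the Claim_ definition above) =====
theorem generate_masked_orthogonal_rank_groups_spec : Claim_equal_generate_masked_orthogonal_rank_groups := by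
  intro ws ps mask _ hpre
  unfold Spec_generate_masked_orthogonal_rank_groups
  unfold generate_masked_orthogonal_rank_groups generate_masked_orthogonal_rank_groups_alt
  simp only
  set masked := ((ps.zip mask).filter (fun p => p.2)).map Prod.fst with hm
  set unmasked := ((ps.zip mask).filter (fun p => !p.2)).map Prod.fst with hu
  by_cases h1 : masked = []
  · simp [h1]
  · by_cases h2 : unmasked = []
    · simp [h1, h2]
    · simp only [h1, h2, if_false]
      have hgs : pvInnerProduct masked (List.replicate masked.length 1) = masked.sum :=
        pvIP_replicate_one masked
      rw [hgs]
      set num := PySem.Int.floordiv ws masked.sum with hnum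
      rw [pvOffsets_eq, pvOffsets_eq]
      by_cases hE : (List.range num.toNat).map (fun k : Nat => pvS unmasked.reverse (k : Int)) = []
      · rw [if_pos hE]
        have hn : (num - 0).toNat = 0 := by
          have := congrArg List.length hE
          simpa using this
        have hr : PySem.List.pyRange 0 num 1 = [] := by
          rw [PySem.List.pyRange_one]
          simp only [List.map_eq_nil_iff, List.range_eq_nil]
          omega
        rw [hr]
        rfl
      · rw [if_neg hE]
        rw [pvFoldl_append_map]
        simp only [List.nil_append]
        rw [PySem.List.pyRange_one 0 num, List.map_map, List.map_map]
        simp only [Int.sub_zero]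
        apply List.map_congr_left
        intro k _
        simp only [Function.comp_apply]
        rw [pvFoldl_append_map]
        simp only [List.nil_append]
        rw [PySem.List.pyRange_one 0 masked.sum, List.map_map, List.map_map]
        simp only [Int.sub_zero]
        apply List.map_congr_left
        intro j _
        simp only [Function.comp_apply]
        rw [pvA_term_eq _ _ h1, pvA_term_eq _ _ h2]
        simp only [zero_add]
        ring
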